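-- pv_equiv track=rewrite | github.com/exploration-space/collaborative-platform | src/collaborative_platform/apps/close_reading/annotator.py | __convert_rows_and_cols_to_start_and_end
-- ===== SOURCE A (Python) =====
-- def __convert_rows_and_cols_to_start_and_end(text, start_row, start_col, end_row, end_col):
--     text_in_lines = text.splitlines(True)
--
--     chars_to_start = 0
--     chars_to_end = 0
--
--     i = 0
--     while i + 1 < start_row:
--         chars_to_start += len(text_in_lines[i])
--         i += 1
--
--     chars_to_start += start_col - 1
--
--     j = 0
--     while j + 1 < end_row:
--         chars_to_end += len(text_in_lines[j])
--         j += 1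
--
--     chars_to_end += end_col
--
--     return chars_to_start, chars_to_end
-- ===== SOURCE B (Python) =====
-- def __convert_rows_and_cols_to_start_and_end(text, start_row, start_col, end_row, end_col):
--     prefix = [0]
--     for line in text.splitlines(True):
--         prefix.append(prefix[-1] + len(line))
--     start = prefix[max(start_row - 1, 0)]
--     end = prefix[max(end_row - 1, 0)]
--     return start + start_col - 1, end + end_col
-- ===== Notes on version B (the rewrite author's own statement) =====
-- stated objective: alternative
-- what changed: Replaces A's two separate while-loops that each re-sum line lengths with a single cumulative-offset table (prefix sums of line lengths) built once, from which both offsets are read by direct indexing.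
import Mathlib
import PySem

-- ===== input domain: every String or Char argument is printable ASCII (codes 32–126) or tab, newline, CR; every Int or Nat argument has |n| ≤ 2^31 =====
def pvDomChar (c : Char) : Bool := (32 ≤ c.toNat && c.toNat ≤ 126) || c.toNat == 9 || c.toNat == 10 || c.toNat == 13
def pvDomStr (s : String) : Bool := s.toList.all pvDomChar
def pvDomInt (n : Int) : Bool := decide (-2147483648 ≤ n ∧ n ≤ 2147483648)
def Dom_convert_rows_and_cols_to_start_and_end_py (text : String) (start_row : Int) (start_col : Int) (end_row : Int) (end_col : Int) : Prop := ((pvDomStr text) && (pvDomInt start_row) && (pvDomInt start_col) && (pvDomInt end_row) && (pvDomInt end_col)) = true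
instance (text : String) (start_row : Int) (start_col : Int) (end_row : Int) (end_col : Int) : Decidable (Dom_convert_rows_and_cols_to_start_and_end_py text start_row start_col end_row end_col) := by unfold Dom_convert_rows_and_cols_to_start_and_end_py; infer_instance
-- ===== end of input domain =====

-- B replaces A's two summation loops by a single cumulative-offset table plus two lookups (alternative decomposition, same cost).

-- ===== PORT A =====
-- Hand port of Python's str.splitlines(keepends=True): exact on the Dom charset,
-- where the only line boundaries are '\n', '\r' and '\r\n' (used by both ports).
def pySplitlinesKeep (cs : List Char) : List (List Char) :=
  go [] cs
where
  go (acc : List Char) : List Char → List (List Char)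
    | [] => if acc = [] then [] else [acc.reverse]
    | '\r' :: '\n' :: rest => (acc.reverse ++ ['\r', '\n']) :: go [] rest
    | c :: rest =>
        if c = '\n' ∨ c = '\r' then (acc.reverse ++ [c]) :: go [] rest
        else go (c :: acc) rest

-- transliteration of A: two while-loops summing line lengths (the loop over i with
-- 'while i + 1 < row' is the fold over range(0, row-1); an out-of-range index is an
-- IndexError in Python, excluded by Pre_, rendered here with default []).
def convert_rows_and_cols_to_start_and_end_py (text : String) (start_row : Int) (start_col : Int) (end_row : Int) (end_col : Int) : Int × Int :=
  let text_in_lines := pySplitlinesKeep text.toList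
  let chars_to_start :=
    (PySem.List.pyRange 0 (start_row - 1) 1).foldl
      (fun acc i => acc + ((PySem.List.pyGetD text_in_lines i []).length : Int)) 0
  let chars_to_start := chars_to_start + start_col - 1
  let chars_to_end :=
    (PySem.List.pyRange 0 (end_row - 1) 1).foldl
      (fun acc j => acc + ((PySem.List.pyGetD text_in_lines j []).length : Int)) 0
  let chars_to_end := chars_to_end + end_col
  (chars_to_start, chars_to_end)

-- ===== PORT B =====
-- transliteration of Source B: build the prefix table (prefix.append(prefix[-1] + len(line))),
-- then two direct lookups at max(row-1, 0).
def buildPrefix (lines : List (List Char)) : List Int :=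
  lines.foldl (fun p line => p ++ [PySem.List.pyGetD p (-1) 0 + (line.length : Int)]) [0]

def convert_rows_and_cols_to_start_and_end_py_alt (text : String) (start_row : Int) (start_col : Int) (end_row : Int) (end_col : Int) : Int × Int :=
  let pref := buildPrefix (pySplitlinesKeep text.toList)
  let start := PySem.List.pyGetD pref (max (start_row - 1) 0) 0
  let endOff := PySem.List.pyGetD pref (max (end_row - 1) 0) 0
  (start + start_col - 1, endOff + end_col)

-- ===== PRECONDITION & SPEC =====
-- Pre_ excludes exactly the inputs where A raises IndexError: a start/end row more than
-- one past the number of lines (B raises at the same point).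
def Pre_convert_rows_and_cols_to_start_and_end_py (text : String) (start_row : Int) (start_col : Int) (end_row : Int) (end_col : Int) : Prop :=
  start_row ≤ (pySplitlinesKeep text.toList).length + 1 ∧
  end_row ≤ (pySplitlinesKeep text.toList).length + 1
instance (text : String) (start_row : Int) (start_col : Int) (end_row : Int) (end_col : Int) : Decidable (Pre_convert_rows_and_cols_to_start_and_end_py text start_row start_col end_row end_col) := by unfold Pre_convert_rows_and_cols_to_start_and_end_py; infer_instance

def pvWitness_convert_rows_and_cols_to_start_and_end_py : String × Int × Int × Int × Int := ("ab\ncd\n", 2, 1, 2, 2)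

def Spec_convert_rows_and_cols_to_start_and_end_py (text : String) (start_row : Int) (start_col : Int) (end_row : Int) (end_col : Int) (out : Int × Int) : Prop := out = convert_rows_and_cols_to_start_and_end_py_alt text start_row start_col end_row end_col
instance (text : String) (start_row : Int) (start_col : Int) (end_row : Int) (end_col : Int) (out : Int × Int) : Decidable (Spec_convert_rows_and_cols_to_start_and_end_py text start_row start_col end_row end_col out) := by unfold Spec_convert_rows_and_cols_to_start_and_end_py; infer_instance

-- ===== CLAIM (what is proved, stated in full; the proofs are below) =====
def Claim_equal_convert_rows_and_cols_to_start_and_end_py : Prop := ∀ (text : String) (start_row : Int) (start_col : Int) (end_row : Int) (end_col : Int), Dom_convert_rows_and_cols_to_start_and_end_py text start_row start_col end_row end_col → Pre_convert_rows_and_cols_to_start_and_end_py text start_row start_col end_row end_col → Spec_convert_rows_and_cols_to_start_and_end_py text start_row start_col end_row end_col (convert_rows_and_cols_to_start_and_end_py text start_row start_col end_row end_col)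

-- ===== LEMMAS AND PROOFS =====

-- abbreviation for the common value: sum of the lengths of the first k lines
def sumTake (lines : List (List Char)) (k : Nat) : Int :=
  ((lines.take k).map (fun l => (l.length : Int))).sum

lemma sumTake_succ (lines : List (List Char)) (k : Nat) (hk : k < lines.length) :
    sumTake lines (k + 1) = sumTake lines k + (lines[k].length : Int) := by
  rw [sumTake, sumTake, List.map_take, List.map_take,
    List.sum_take_succ _ _ (by simpa using hk)]
  simp

-- A's loop computes sumTake
lemma aLoop_eq_sumTake (lines : List (List Char)) (k : Nat) (hk : k ≤ lines.length) :
    (PySem.List.pyRange 0 (k : Int) 1).foldl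
      (fun acc i => acc + ((PySem.List.pyGetD lines i []).length : Int)) 0
      = sumTake lines k := by
  induction k with
  | zero => simp [sumTake]
  | succ n ih =>
      have hn : n < lines.length := by omega
      have hsplit : PySem.List.pyRange 0 ((n : Int) + 1) 1
          = PySem.List.pyRange 0 (n : Int) 1 ++ [(n : Int)] :=
        PySem.List.pyRange_one_succ_right (by positivity)
      push_cast
      rw [hsplit, List.foldl_append, ih (by omega)]
      simp [sumTake_succ lines n hn, PySem.List.pyGetD_natCast,
        List.getD_eq_getElem?_getD, List.getElem?_eq_getElem hn]

lemma buildPrefix_append (lines : List (List Char)) (l : List Char) :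
    buildPrefix (lines ++ [l])
      = buildPrefix lines
        ++ [PySem.List.pyGetD (buildPrefix lines) (-1) 0 + (l.length : Int)] := by
  simp [buildPrefix, List.foldl_append]

lemma buildPrefix_ne_nil (lines : List (List Char)) : buildPrefix lines ≠ [] := by
  induction lines using List.reverseRecOn with
  | nil => simp [buildPrefix]
  | append_singleton ls l ih => simp [buildPrefix_append]

lemma buildPrefix_length (lines : List (List Char)) :
    (buildPrefix lines).length = lines.length + 1 := by
  induction lines using List.reverseRecOn with
  | nil => simp [buildPrefix]
  | append_singleton ls l ih => simp [buildPrefix_append, ih]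

-- B's table holds the same sums
lemma buildPrefix_get (lines : List (List Char)) (k : Nat) (hk : k ≤ lines.length) :
    (buildPrefix lines)[k]? = some (sumTake lines k) := by
  induction lines using List.reverseRecOn generalizing k with
  | nil =>
      have hk0 : k = 0 := by simpa using hk
      subst hk0
      simp [buildPrefix, sumTake]
  | append_singleton ls l ih =>
      rw [buildPrefix_append]
      rcases Nat.lt_or_ge k (ls.length + 1) with h | h
      · rw [List.getElem?_append_left (by rw [buildPrefix_length]; omega)]
        rw [ih k (by omega)]
        have : (ls ++ [l]).take k = ls.take k := by
          rw [List.take_append_of_le_length (by omega)]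
        simp [sumTake, this]
      · have hk' : k = ls.length + 1 := by
          simp at hk; omega
        subst hk'
        have hlast : PySem.List.pyGetD (buildPrefix ls) (-1) 0 = sumTake ls ls.length := by
          have hosome : (buildPrefix ls).getLast? = some (sumTake ls ls.length) := by
            rw [List.getLast?_eq_getElem?, buildPrefix_length]
            simpa using ih ls.length le_rfl
          rw [PySem.List.pyGetD_neg_one (buildPrefix ls) 0 (buildPrefix_ne_nil ls)]
          rw [List.getLast?_eq_some_getLast (buildPrefix_ne_nil ls)] at hosome
          exact Option.some.inj hosome
        have hsum : sumTake (ls ++ [l]) (ls.length + 1)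
            = sumTake ls ls.length + (l.length : Int) := by
          simp [sumTake]
        rw [List.getElem?_append_right (Nat.le_of_eq (buildPrefix_length ls))]
        simp [buildPrefix_length, hlast, hsum]

-- one row's contribution: A's loop value = B's table lookup
lemma row_offset_eq (lines : List (List Char)) (r : Int) (hr : r ≤ lines.length + 1) :
    (PySem.List.pyRange 0 (r - 1) 1).foldl
      (fun acc i => acc + ((PySem.List.pyGetD lines i []).length : Int)) 0
      = PySem.List.pyGetD (buildPrefix lines) (max (r - 1) 0) 0 := by
  set k : Nat := (r - 1).toNat with hk
  have hkle : k ≤ lines.length := by omega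
  have hrange : PySem.List.pyRange 0 (r - 1) 1 = PySem.List.pyRange 0 (k : Int) 1 := by
    by_cases h : r ≤ 1
    · rw [PySem.List.pyRange_one_eq_nil (by omega), PySem.List.pyRange_one_eq_nil (by omega)]
    · congr 1; omega
  have hmax : max (r - 1) 0 = (k : Int) := by omega
  rw [hrange, aLoop_eq_sumTake lines k hkle, hmax,
    PySem.List.pyGetD_natCast]
  rw [List.getD_eq_getElem?_getD, buildPrefix_get lines k hkle]
  rfl

-- ===== VERDICT (by name: the statement is the Claim_ definition above) =====
theorem convert_rows_and_cols_to_start_and_end_py_spec : Claim_equal_convert_rows_and_cols_to_start_and_end_py := by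
  intro text sr sc er ec _ hpre
  obtain ⟨h1, h2⟩ := hpre
  unfold Spec_convert_rows_and_cols_to_start_and_end_py
  unfold convert_rows_and_cols_to_start_and_end_py convert_rows_and_cols_to_start_and_end_py_alt
  simp only
  rw [row_offset_eq _ _ h1, row_offset_eq _ _ h2]
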